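-- pv_equiv track=rewrite | github.com/Jessie1201/python_practice | interview_preparation/task1_1.py | solution
-- ===== SOURCE A (Python) =====
-- def solution(A,B):
--     res = []
--     for i in range(2, B+1):
--         count = 0
--         while i**2 <= B:
--             i = i**2
--             count += 1
--         if i >= A:
--             res.append(count)
--     if not res:
--         return 0
--     return max(res)
-- ===== SOURCE B (Python) =====
-- def solution(A, B):
--     # Only bases up to sqrt(B) can be squared; any larger base contributes count 0,
--     # and some count-0 base exists iff B >= 2 and A <= B (e.g. i = B itself).
--     if B < 2 or A > B:
--         return 0
--     best = 0
--     i = 2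
--     while i * i <= B:
--         v = i
--         c = 0
--         while v * v <= B:
--             v = v * v
--             c += 1
--         if v >= A:
--             if c > best:
--                 best = c
--         i += 1
--     return best
-- ===== Notes on version B (the rewrite author's own statement) =====
-- stated objective: faster
-- what changed: B iterates only over bases 2..floor(sqrt(B)) (after an early-exit when B<2 or A>B) with a running max instead of A's pass over all of 2..B that builds a list and takes max at the end; bases above sqrt(B) can only contribute count 0, which the early-exit condition accounts for.
import Mathlib
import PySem

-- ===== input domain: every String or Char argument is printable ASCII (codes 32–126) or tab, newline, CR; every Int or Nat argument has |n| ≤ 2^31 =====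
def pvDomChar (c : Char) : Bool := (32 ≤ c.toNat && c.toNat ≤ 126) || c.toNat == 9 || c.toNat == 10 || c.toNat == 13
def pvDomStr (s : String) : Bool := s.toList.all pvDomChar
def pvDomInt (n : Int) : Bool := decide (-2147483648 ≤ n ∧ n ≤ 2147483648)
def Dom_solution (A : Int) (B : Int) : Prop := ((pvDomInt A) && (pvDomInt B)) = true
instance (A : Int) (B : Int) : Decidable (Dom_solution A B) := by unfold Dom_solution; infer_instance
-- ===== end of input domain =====

-- B iterates only over bases 2..⌊√B⌋ with a running max (plus an early exit when B < 2 or A > B),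
-- instead of A's pass over all of 2..B that builds a list and takes its max; objective: faster.

-- ===== PORT A =====
-- inner 'while i**2 <= B: i = i**2; count += 1' of A; the Nat fuel only makes the loop
-- structurally total — at every call site the fuel (B - i).toNat bounds the iteration count
-- (proved in sqLoopA_eq_sqA below), so this is exactly Python's while loop there
def sqLoopA (B : Int) : Nat → Int → Int → Int × Int
  | 0, i, count => (i, count)
  | f + 1, i, count =>
      if i * i ≤ B then sqLoopA B f (i * i) (count + 1) else (i, count)

-- 'res.append(count)' is encoded as cons onto a reversed accumulator, undone by one final
-- .reverse: the same res list as Python's, with Python's O(1) append cost (Lean's ++ is O(n))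
def solution (A : Int) (B : Int) : Int :=
  let fuel := B.toNat  -- one fuel bound for every inner while (≥ (B - i).toNat for each i)
  let res := ((PySem.List.pyRange 2 (B + 1) 1).foldl
    (fun res i =>
      let vc := sqLoopA B fuel i 0
      if vc.1 ≥ A then vc.2 :: res else res) []).reverse
  if res.isEmpty then 0
  else (PySem.List.max? res (fun x => x)).getD 0

-- ===== PORT B =====
-- inner 'while v*v <= B: v = v*v; c += 1' of Source B (same fuel remark as above)
def sqLoopB (B : Int) : Nat → Int → Int → Int × Int
  | 0, v, c => (v, c)
  | f + 1, v, c =>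
      if v * v ≤ B then sqLoopB B f (v * v) (c + 1) else (v, c)

-- outer 'while i*i <= B' of Source B with the running-max accumulator 'best'
def outerB (A B : Int) : Nat → Int → Int → Int
  | 0, _, best => best
  | f + 1, i, best =>
      if i * i ≤ B then
        let vc := sqLoopB B (B - i).toNat i 0
        outerB A B f (i + 1)
          (if vc.1 ≥ A then (if vc.2 > best then vc.2 else best) else best)
      else best

def solution_alt (A : Int) (B : Int) : Int :=
  if B < 2 ∨ A > B then 0 else outerB A B (B - 2).toNat 2 0

-- ===== PRECONDITION & SPEC =====
def Spec_solution (A : Int) (B : Int) (out : Int) : Prop := out = solution_alt A B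
instance (A : Int) (B : Int) (out : Int) : Decidable (Spec_solution A B out) := by unfold Spec_solution; infer_instance

-- ===== CLAIM (what is proved, stated in full; the proofs are below) =====
def Claim_equal_solution : Prop := ∀ (A : Int) (B : Int), Dom_solution A B → Spec_solution A B (solution A B)

-- ===== LEMMAS AND PROOFS =====

-- proof-side model of the inner squaring loop, by well-founded recursion (no fuel)
def sqA (B i count : Int) : Int × Int :=
  if h : 2 ≤ i ∧ i * i ≤ B then sqA B (i * i) (count + 1) else (i, count)
termination_by (B - i).toNat
decreasing_by
  have : i + i ≤ i * i := by nlinarith [h.1]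
  omega

-- proof-side model of Source B's outer loop, by well-founded recursion
def outerW (A B i best : Int) : Int :=
  if h : 2 ≤ i ∧ i * i ≤ B then
    outerW A B (i + 1)
      (if (sqA B i 0).1 ≥ A then (if (sqA B i 0).2 > best then (sqA B i 0).2 else best) else best)
  else best
termination_by (B - i).toNat
decreasing_by
  have : i + i ≤ i * i := by nlinarith [h.1]
  omega

theorem sqA_of_gt (B i c : Int) (hg : B < i * i) : sqA B i c = (i, c) := by
  rw [sqA, dif_neg]
  rintro ⟨-, h⟩
  omega

-- the fueled port loop computes the while loop whenever the fuel covers the measure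
theorem sqLoopA_eq_sqA (B : Int) (f : Nat) (i c : Int) (h2 : 2 ≤ i)
    (hf : (B - i).toNat ≤ f) : sqLoopA B f i c = sqA B i c := by
  induction f generalizing i c with
  | zero =>
      have hBi : B ≤ i := by omega
      have : B < i * i := by nlinarith
      rw [sqA_of_gt B i c this]
      rfl
  | succ f ih =>
      rw [sqLoopA, sqA]
      by_cases h : i * i ≤ B
      · rw [if_pos h, dif_pos ⟨h2, h⟩]
        have hii : i + i ≤ i * i := by nlinarith
        exact ih (i * i) (c + 1) (by omega) (by omega)
      · rw [if_neg h, dif_neg (by rintro ⟨-, hc⟩; omega)]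

theorem sqLoopB_eq_sqLoopA (B : Int) (f : Nat) (v c : Int) :
    sqLoopB B f v c = sqLoopA B f v c := by
  induction f generalizing v c with
  | zero => rfl
  | succ f ih =>
      rw [sqLoopB, sqLoopA]
      split
      · exact ih (v * v) (c + 1)
      · rfl

theorem outerB_eq_outerW (A B : Int) (f : Nat) (i best : Int) (h2 : 2 ≤ i)
    (hf : (B - i).toNat ≤ f) : outerB A B f i best = outerW A B i best := by
  induction f generalizing i best with
  | zero =>
      have hBi : B ≤ i := by omega
      have : B < i * i := by nlinarith
      rw [outerW, dif_neg (by rintro ⟨-, hc⟩; omega)]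
      rfl
  | succ f ih =>
      rw [outerB, outerW]
      by_cases h : i * i ≤ B
      · rw [if_pos h, dif_pos ⟨h2, h⟩]
        have hii : i + i ≤ i * i := by nlinarith
        simp only [sqLoopB_eq_sqLoopA,
          sqLoopA_eq_sqA B ((B - i).toNat) i 0 h2 (le_refl _)]
        exact ih (i + 1) _ (by omega) (by omega)
      · rw [if_neg h, dif_neg (by rintro ⟨-, hc⟩; omega)]

theorem sqA_snd_ge (B i c : Int) : c ≤ (sqA B i c).2 := by
  rw [sqA]
  split
  · rename_i h
    have : i + i ≤ i * i := by nlinarith [h.1]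
    have := sqA_snd_ge B (i * i) (c + 1)
    omega
  · simp
termination_by (B - i).toNat
decreasing_by omega

theorem sqA_fst_le (B i c : Int) (h2 : 2 ≤ i) (hB : i ≤ B) : (sqA B i c).1 ≤ B := by
  rw [sqA]
  split
  · rename_i h
    have hlt : i + i ≤ i * i := by nlinarith
    exact sqA_fst_le B (i * i) (c + 1) (by omega) h.2
  · exact hB
termination_by (B - i).toNat
decreasing_by
  rename_i h
  have : i + i ≤ i * i := by nlinarith [h.1]
  omega

theorem foldl_cons_ite {α β : Type} (p : α → Prop) [DecidablePred p] (f : α → β)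
    (l : List α) (acc : List β) :
    l.foldl (fun acc x => if p x then f x :: acc else acc) acc
      = ((l.filter (fun x => decide (p x))).map f).reverse ++ acc := by
  induction l generalizing acc with
  | nil => simp
  | cons y t ih =>
      simp only [List.foldl_cons, List.filter_cons]
      by_cases hy : p y
      · simp [hy, ih]
      · simp [hy, ih]

theorem foldl_max_of_le (l : List Int) (b : Int) (h : ∀ x ∈ l, x ≤ b) :
    l.foldl max b = b := by
  induction l generalizing b with
  | nil => rfl
  | cons x t ih =>
      have hx : x ≤ b := h x (by simp)
      have : max b x = b := by omega
      simp only [List.foldl_cons, this]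
      exact ih b (fun y hy => h y (by simp [hy]))

-- the outer while of Source B computes the running max of A's retained counts from i upward
theorem main_loop (A B i best : Int) (h2 : 2 ≤ i) (hb : 0 ≤ best) :
    (((PySem.List.pyRange i (B + 1) 1).filter
        (fun j => decide ((sqA B j 0).1 ≥ A))).map
        (fun j => (sqA B j 0).2)).foldl max best = outerW A B i best := by
  rw [outerW]
  by_cases hsq : i * i ≤ B
  · rw [dif_pos ⟨h2, hsq⟩]
    have hiltB : i < B := by nlinarith
    rw [PySem.List.pyRange_one_cons (by omega : i < B + 1)]
    simp only [List.filter_cons]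
    have hc0 : (0 : Int) ≤ (sqA B i 0).2 := sqA_snd_ge B i 0
    by_cases hA : (sqA B i 0).1 ≥ A
    · rw [if_pos (by simpa using hA), if_pos hA]
      simp only [List.map_cons, List.foldl_cons]
      have hmax : max best (sqA B i 0).2 =
          (if (sqA B i 0).2 > best then (sqA B i 0).2 else best) := by
        split <;> omega
      rw [hmax]
      exact main_loop A B (i + 1) _ (by omega) (by split <;> omega)
    · rw [if_neg (by simpa using hA), if_neg hA]
      exact main_loop A B (i + 1) best (by omega) hb
  · rw [dif_neg (by rintro ⟨-, h⟩; omega)]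
    apply foldl_max_of_le
    intro x hx
    simp only [List.mem_map, List.mem_filter] at hx
    obtain ⟨j, ⟨hjm, -⟩, hxe⟩ := hx
    have hj : i ≤ j ∧ j < B + 1 := by
      have := (PySem.List.mem_pyRange_one).1 hjm; exact this
    have hjj : B < j * j := by nlinarith [hj.1, hj.2, h2]
    rw [sqA_of_gt B j 0 hjj] at hxe
    omega
termination_by (B - i).toNat
decreasing_by all_goals omega

theorem max?_getD_eq_foldl (l : List Int) (hne : l ≠ [])
    (h0 : ∀ x ∈ l, 0 ≤ x) : (PySem.List.max? l (fun x => x)).getD 0 = l.foldl max 0 := by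
  cases l with
  | nil => exact absurd rfl hne
  | cons x t =>
      rw [PySem.List.max?_id_cons]
      have hx : 0 ≤ x := h0 x (by simp)
      have : max (0 : Int) x = x := by omega
      simp only [Option.getD_some, List.foldl_cons, this]

-- ===== VERDICT (by name: the statement is the Claim_ definition above) =====
theorem solution_spec : Claim_equal_solution := by
  intro A B _
  unfold Spec_solution solution solution_alt
  simp only []
  rw [foldl_cons_ite (fun i => (sqLoopA B B.toNat i 0).1 ≥ A)
      (fun i => (sqLoopA B B.toNat i 0).2)]
  simp only [List.append_nil, List.reverse_reverse]
  set L := PySem.List.pyRange 2 (B + 1) 1 with hL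
  have hLmem : ∀ j ∈ L, sqLoopA B B.toNat j 0 = sqA B j 0 := by
    intro j hj
    have hjr := (PySem.List.mem_pyRange_one).1 hj
    exact sqLoopA_eq_sqA B B.toNat j 0 (by omega) (by omega)
  rw [List.filter_congr (fun j hj => by rw [hLmem j hj])]
  rw [List.map_congr_left
      (fun j hj => by rw [hLmem j (List.mem_of_mem_filter hj)])]
  rw [outerB_eq_outerW A B ((B - 2).toNat) 2 0 (by omega) (le_refl _)]
  by_cases hB2 : B < 2
  · rw [if_pos (Or.inl hB2)]
    rw [hL, PySem.List.pyRange_one_eq_nil (by omega)]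
    simp
  · by_cases hAB : A > B
    · rw [if_pos (Or.inr hAB)]
      have hfe : L.filter (fun j => decide ((sqA B j 0).1 ≥ A)) = [] := by
        rw [List.filter_eq_nil_iff]
        intro j hj
        have hjr := (PySem.List.mem_pyRange_one).1 hj
        have := sqA_fst_le B j 0 (by omega) (by omega)
        simp only [ge_iff_le, decide_eq_true_eq]
        omega
      rw [hfe]
      simp
    · rw [if_neg (show ¬(B < 2 ∨ A > B) by omega)]
      set res := (L.filter (fun j => decide ((sqA B j 0).1 ≥ A))).map
          (fun j => (sqA B j 0).2) with hres
      have hBmem : (B : Int) ∈ L.filter (fun j => decide ((sqA B j 0).1 ≥ A)) := by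
        rw [List.mem_filter]
        constructor
        · exact (PySem.List.mem_pyRange_one).2 ⟨by omega, by omega⟩
        · rw [sqA_of_gt B B 0 (by nlinarith)]
          simp only [ge_iff_le, decide_eq_true_eq]
          omega
      have hne : res ≠ [] := by
        rw [hres]
        simp only [ne_eq, List.map_eq_nil_iff]
        intro hnil
        rw [hnil] at hBmem
        exact absurd hBmem (List.not_mem_nil)
      have h0 : ∀ x ∈ res, (0 : Int) ≤ x := by
        intro x hx
        rw [hres] at hx
        simp only [List.mem_map] at hx
        obtain ⟨j, -, hxe⟩ := hx
        have := sqA_snd_ge B j 0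
        omega
      rw [if_neg (show ¬res.isEmpty = true by simpa using hne)]
      rw [max?_getD_eq_foldl res hne h0]
      exact main_loop A B 2 0 (by omega) (by omega)
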